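-- pv_equiv track=rewrite | github.com/mikkomakipaa/HAPortfolio | custom_components/portfolio_tracker/utils.py | sanitize_entity_name
-- ===== SOURCE A (Python) =====
-- def sanitize_entity_name(name: str) -> str:
--     """Sanitize entity name to be HA compliant.
--
--     Args:
--         name: The name to sanitize
--
--     Returns:
--         Sanitized name suitable for HA entities
--     """
--     if not name:
--         return "unknown"
--
--     # Replace spaces and special chars with underscores
--     sanitized = ''.join(c if c.isalnum() else '_' for c in name.lower())
--
--     # Remove multiple consecutive underscores
--     while '__' in sanitized:
--         sanitized = sanitized.replace('__', '_')
--
--     # Remove leading/trailing underscores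
--     sanitized = sanitized.strip('_')
--
--     return sanitized or "unknown"
-- ===== SOURCE B (Python) =====
-- def sanitize_entity_name(name: str) -> str:
--     """Sanitize entity name to be HA compliant (single grouping pass)."""
--     if not name:
--         return "unknown"
--     tokens = []
--     cur = ""
--     for c in name.lower():
--         if c.isalnum():
--             cur += c
--         elif cur:
--             tokens.append(cur)
--             cur = ""
--     if cur:
--         tokens.append(cur)
--     return "_".join(tokens) or "unknown"
-- ===== Notes on version B (the rewrite author's own statement) =====
-- stated objective: simpler
-- what changed: Replaces per-char substitution plus a repeated underscore-collapsing replace loop plus a final strip with a single grouping pass that collects maximal alnum runs into tokens and joins them.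
import Mathlib
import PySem

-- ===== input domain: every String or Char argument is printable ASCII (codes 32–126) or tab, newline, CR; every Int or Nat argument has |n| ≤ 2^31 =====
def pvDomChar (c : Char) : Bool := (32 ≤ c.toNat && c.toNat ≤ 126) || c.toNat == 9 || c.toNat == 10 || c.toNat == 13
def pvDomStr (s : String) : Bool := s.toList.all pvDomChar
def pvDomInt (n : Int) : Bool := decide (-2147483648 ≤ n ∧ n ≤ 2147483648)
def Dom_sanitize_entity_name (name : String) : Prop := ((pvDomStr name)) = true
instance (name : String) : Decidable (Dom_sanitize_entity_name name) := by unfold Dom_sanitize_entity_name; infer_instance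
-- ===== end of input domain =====

-- B replaces A's substitute/collapse/strip pipeline by one grouping pass over maximal alnum runs.

-- ===== PORT A =====
-- helpers for the termination of A's `while '__' in sanitized:` loop (cited by the port's decreasing_by)

-- one pass of Python's sanitized.replace('__', '_') (all non-overlapping occurrences, left to right)
def pvRep1 : List Char → List Char
  | [] => []
  | [c] => [c]
  | a :: b :: t => if a = '_' ∧ b = '_' then '_' :: pvRep1 t else a :: pvRep1 (b :: t)

theorem pvRep1_length_le : ∀ s : List Char, (pvRep1 s).length ≤ s.length := by
  intro s
  induction s using pvRep1.induct with
  | case1 => simp [pvRep1]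
  | case2 c => simp [pvRep1]
  | case3 a b t h ih =>
      simp only [pvRep1, if_pos h, List.length_cons]
      simp only [List.length_cons] at ih ⊢; omega
  | case4 a b t h ih =>
      simp only [pvRep1, if_neg h, List.length_cons]
      simp only [List.length_cons] at ih ⊢; omega

theorem pvReplace_go_eq : ∀ (fuel : Nat) (l acc : List Char), l.length ≤ fuel →
    PySem.Chars.replace.go ['_', '_'] ['_'] fuel l acc = acc.reverse ++ pvRep1 l := by
  intro fuel
  induction fuel with
  | zero =>
      intro l acc h
      have : l = [] := by cases l <;> simp_all
      subst this; simp [PySem.Chars.replace.go, pvRep1]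
  | succ n ih =>
      intro l acc h
      match l with
      | [] => simp [PySem.Chars.replace.go, pvRep1]
      | [c] =>
          have hpre : (['_', '_'] : List Char).isPrefixOf [c] = false := by
            simp [List.isPrefixOf]
          simp only [PySem.Chars.replace.go, hpre]
          rw [ih [] (c :: acc) (by simp)]
          simp [pvRep1]
      | a :: b :: t =>
          by_cases hab : a = '_' ∧ b = '_'
          · obtain ⟨ha, hb⟩ := hab; subst ha; subst hb
            have hpre : (['_', '_'] : List Char).isPrefixOf ('_' :: '_' :: t) = true := by
              simp [List.isPrefixOf]
            simp only [PySem.Chars.replace.go, hpre, if_true]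
            rw [show List.drop (['_', '_'] : List Char).length ('_' :: '_' :: t) = t from rfl]
            rw [ih t (['_'].reverse ++ acc) (by simp at h ⊢; omega)]
            simp [pvRep1]
          · have hpre : (['_', '_'] : List Char).isPrefixOf (a :: b :: t) = false := by
              by_contra hc
              have : (['_','_'] : List Char) <+: a :: b :: t := by
                exact List.isPrefixOf_iff_prefix.mp (by simpa using hc)
              rcases this with ⟨u, hu⟩
              simp at hu
              exact hab ⟨hu.1.symm, hu.2.1.symm⟩
            simp only [PySem.Chars.replace.go, hpre]
            rw [ih (b :: t) (a :: acc) (by simp at h ⊢; omega)]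
            simp [pvRep1, if_neg hab]

theorem pvReplace_eq_rep1 (s : List Char) :
    PySem.Chars.replace s ['_', '_'] ['_'] = pvRep1 s := by
  have h : PySem.Chars.replace s ['_', '_'] ['_']
      = PySem.Chars.replace.go ['_', '_'] ['_'] s.length s [] := by
    simp [PySem.Chars.replace]
  rw [h, pvReplace_go_eq s.length s [] le_rfl]; rfl

theorem pvRep1_length_lt : ∀ s : List Char, (['_', '_'] : List Char) <:+: s →
    (pvRep1 s).length < s.length := by
  intro s
  induction s using pvRep1.induct with
  | case1 => intro h; simp at h
  | case2 c =>
      intro h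
      have := h.length_le; simp at this
  | case3 a b t h ih =>
      intro _
      have := pvRep1_length_le t
      simp only [pvRep1, if_pos h]
      simp only [List.length_cons]; omega
  | case4 a b t h ih =>
      intro hinf
      rcases List.infix_cons_iff.mp hinf with hp | hi
      · rcases hp with ⟨u, hu⟩
        simp at hu
        exact absurd ⟨hu.1.symm, hu.2.1.symm⟩ h
      · have := ih hi
        simp only [pvRep1, if_neg h, List.length_cons]
        simp only [List.length_cons] at this ⊢; omega

theorem pvReplace_length_lt (s : List Char) (h : PySem.Chars.isIn ['_', '_'] s = true) :
    (PySem.Chars.replace s ['_', '_'] ['_']).length < s.length := by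
  rw [pvReplace_eq_rep1]
  exact pvRep1_length_lt s ((PySem.Chars.isIn_iff_infix _ _).mp h)

-- the `while '__' in sanitized: sanitized = sanitized.replace('__', '_')` loop
def pvLoopA (s : List Char) : List Char :=
  if h : PySem.Chars.isIn ['_', '_'] s = true then
    pvLoopA (PySem.Chars.replace s ['_', '_'] ['_'])
  else s
termination_by s.length
decreasing_by exact pvReplace_length_lt s h

def sanitize_entity_name (name : String) : String :=
  if name = "" then "unknown"
  else
    -- ''.join(c if c.isalnum() else '_' for c in name.lower())
    let sanitized := (PySem.Chars.lower name.toList).map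
      (fun c => if PySem.Chars.isalnum c then c else '_')
    let sanitized := pvLoopA sanitized
    let sanitized := PySem.Chars.stripChars sanitized ['_']
    if sanitized = [] then "unknown" else String.mk sanitized

-- ===== PORT B =====
def sanitize_entity_name_alt (name : String) : String :=
  if name = "" then "unknown"
  else
    let p := (PySem.Chars.lower name.toList).foldl
      (fun (acc : List (List Char) × List Char) c =>
        if PySem.Chars.isalnum c then (acc.1, acc.2 ++ [c])
        else if acc.2 = [] then acc else (acc.1 ++ [acc.2], []))
      ([], [])
    let tokens := if p.2 = [] then p.1 else p.1 ++ [p.2]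
    let r := PySem.Chars.join ['_'] tokens
    if r = [] then "unknown" else String.mk r

-- ===== PRECONDITION & SPEC =====
def Spec_sanitize_entity_name (name : String) (out : String) : Prop := out = sanitize_entity_name_alt name
instance (name : String) (out : String) : Decidable (Spec_sanitize_entity_name name out) := by unfold Spec_sanitize_entity_name; infer_instance

-- ===== CLAIM (what is proved, stated in full; the proofs are below) =====
def Claim_equal_sanitize_entity_name : Prop := ∀ (name : String), Dom_sanitize_entity_name name → Spec_sanitize_entity_name name (sanitize_entity_name name)

-- ===== LEMMAS AND PROOFS =====

def pvSub (c : Char) : Char := if PySem.Chars.isalnum c then c else '_'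

def pvQ (c : Char) : Bool := c == '_'

def pvRstrip (x : List Char) : List Char := (List.dropWhile pvQ x.reverse).reverse

def pvStripU (x : List Char) : List Char := pvRstrip (List.dropWhile pvQ x)

theorem pvStrip_eq (x : List Char) : PySem.Chars.stripChars x ['_'] = pvStripU x := by
  have hp : (fun c => (['_'] : List Char).contains c) = pvQ := by
    funext c
    cases h : c == '_' <;> simp [pvQ, List.contains, List.elem, h]
  show (List.dropWhile (fun c => (['_'] : List Char).contains c)
      ((List.dropWhile (fun c => (['_'] : List Char).contains c) x).reverse)).reverse
    = pvStripU x
  rw [hp]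
  rfl

def pvCollapse : List Char → List Char
  | [] => []
  | [c] => [c]
  | a :: b :: t => if a = '_' ∧ b = '_' then pvCollapse (b :: t) else a :: pvCollapse (b :: t)

theorem pvCollapse_cons₂ (a b : Char) (t : List Char) :
    pvCollapse (a :: b :: t) =
      if a = '_' ∧ b = '_' then pvCollapse (b :: t) else a :: pvCollapse (b :: t) := by
  simp only [pvCollapse]

theorem pvCollapse_uu (t : List Char) : pvCollapse ('_' :: '_' :: t) = pvCollapse ('_' :: t) := by
  rw [pvCollapse_cons₂, if_pos (show ('_' : Char) = '_' ∧ ('_' : Char) = '_' from ⟨rfl, rfl⟩)]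

theorem pvRep1_cons₂ (a b : Char) (t : List Char) :
    pvRep1 (a :: b :: t) =
      if a = '_' ∧ b = '_' then '_' :: pvRep1 t else a :: pvRep1 (b :: t) := by
  simp only [pvRep1]

theorem pvRep1_uu (t : List Char) : pvRep1 ('_' :: '_' :: t) = '_' :: pvRep1 t := by
  rw [pvRep1_cons₂, if_pos (show ('_' : Char) = '_' ∧ ('_' : Char) = '_' from ⟨rfl, rfl⟩)]

def pvGroups : List Char → List (List Char)
  | [] => []
  | c :: t =>
    if PySem.Chars.isalnum c then
      (c :: t.takeWhile PySem.Chars.isalnum) :: pvGroups (t.dropWhile PySem.Chars.isalnum)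
    else pvGroups t
termination_by s => s.length
decreasing_by
  · have h := List.length_dropWhile_le (p := PySem.Chars.isalnum) (l := t)
    simp only [List.length_cons]; omega
  · simp

theorem pvGroups_cons (c : Char) (t : List Char) :
    pvGroups (c :: t) =
      if PySem.Chars.isalnum c then
        (c :: t.takeWhile PySem.Chars.isalnum) :: pvGroups (t.dropWhile PySem.Chars.isalnum)
      else pvGroups t := by
  rw [pvGroups]

def pvJ (cs : List Char) : List Char := PySem.Chars.join ['_'] (pvGroups cs)

def pvJ' : List Char → List Char
  | [] => []
  | d :: u => if PySem.Chars.isalnum d then d :: pvJ' u else if pvJ u = [] then [] else '_' :: pvJ u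

theorem pvJ'_cons (d : Char) (u : List Char) :
    pvJ' (d :: u) =
      if PySem.Chars.isalnum d then d :: pvJ' u else if pvJ u = [] then [] else '_' :: pvJ u := by
  simp only [pvJ']

theorem pvAlnum_ne (c : Char) (h : PySem.Chars.isalnum c = true) : c ≠ '_' := by
  intro hc; subst hc
  have : PySem.Chars.isalnum '_' = false := by decide
  rw [this] at h
  simp at h

theorem pvCollapse_cons_ne (c : Char) (x : List Char) (hc : c ≠ '_') :
    pvCollapse (c :: x) = c :: pvCollapse x := by
  cases x with
  | nil => simp [pvCollapse]
  | cons b t => rw [pvCollapse_cons₂, if_neg (by tauto)]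

theorem pvRstrip_cons (a : Char) (w : List Char) :
    pvRstrip (a :: w) = if pvRstrip w = [] then (if pvQ a then [] else [a]) else a :: pvRstrip w := by
  simp only [pvRstrip, List.reverse_cons, List.dropWhile_append]
  by_cases h : List.dropWhile pvQ w.reverse = []
  · simp [h, List.dropWhile]
    by_cases hq : pvQ a <;> simp [hq]
  · simp [h, List.isEmpty_iff, List.reverse_eq_nil_iff]

theorem pvRstrip_cons_ne (c : Char) (w : List Char) (hc : c ≠ '_') :
    pvRstrip (c :: w) = c :: pvRstrip w := by
  rw [pvRstrip_cons]
  have hq : pvQ c = false := by simp [pvQ, hc]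
  by_cases h : pvRstrip w = [] <;> simp [h, hq]

theorem pvStripU_cons_us (y : List Char) : pvStripU ('_' :: y) = pvStripU y := by
  simp [pvStripU, List.dropWhile, pvQ]

theorem pvStripU_cons_ne (c : Char) (y : List Char) (hc : c ≠ '_') :
    pvStripU (c :: y) = c :: pvRstrip y := by
  have hq : pvQ c = false := by simp [pvQ, hc]
  simp [pvStripU, List.dropWhile, hq, pvRstrip_cons_ne c y hc]

theorem pvH1 (x : List Char) :
    pvStripU (pvCollapse ('_' :: x)) = pvStripU (pvCollapse x) := by
  cases x with
  | nil => rfl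
  | cons b t =>
    by_cases hb : b = '_'
    · subst hb
      rw [pvCollapse_uu]
    · rw [pvCollapse_cons₂, if_neg (by tauto)]
      exact pvStripU_cons_us _

theorem pvH3 (x : List Char) :
    pvRstrip (pvCollapse ('_' :: x)) =
      if pvStripU (pvCollapse x) = [] then [] else '_' :: pvStripU (pvCollapse x) := by
  induction x with
  | nil => rfl
  | cons b y ih =>
    by_cases hb : b = '_'
    · subst hb
      rw [pvCollapse_uu, ih, pvH1]
    · rw [pvCollapse_cons₂ '_' b, if_neg (by tauto), pvCollapse_cons_ne b _ hb,
          pvRstrip_cons, pvRstrip_cons_ne b _ hb, pvStripU_cons_ne b _ hb]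
      simp [pvQ]

theorem pvNoDD (s : List Char) (h : PySem.Chars.isIn ['_', '_'] s = false) :
    pvCollapse s = s := by
  have hinf : ¬ (['_', '_'] : List Char) <:+: s := by
    intro hc
    have := (PySem.Chars.isIn_iff_infix _ _).mpr hc
    rw [h] at this
    simp at this
  clear h
  induction s using pvCollapse.induct with
  | case1 => rfl
  | case2 c => rfl
  | case3 a b t h ih =>
    exact absurd (List.IsPrefix.isInfix ⟨t, by simp [h.1, h.2]⟩) hinf
  | case4 a b t h ih =>
    have hne : ¬ (['_', '_'] : List Char) <:+: b :: t := fun hc =>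
      hinf (List.infix_cons_iff.mpr (Or.inr hc))
    rw [pvCollapse_cons₂, if_neg h, ih hne]

theorem pvAux : ∀ (n : Nat) (t : List Char) (c : Char), t.length ≤ n →
    pvCollapse (c :: pvRep1 t) = pvCollapse (c :: t) := by
  intro n
  induction n with
  | zero =>
    intro t c h
    have : t = [] := by cases t <;> simp_all
    subst this; rfl
  | succ m ih =>
    intro t c h
    rcases t with _ | ⟨d, _ | ⟨e, u⟩⟩
    · rfl
    · rfl
    · by_cases hde : d = '_' ∧ e = '_'
      · obtain ⟨hd, he⟩ := hde; subst hd; subst he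
        have hlen : u.length ≤ m := by simp at h; omega
        rw [pvRep1_uu, pvCollapse_cons₂, pvCollapse_cons₂, pvCollapse_uu, ih u '_' hlen]
      · have hlen : (e :: u).length ≤ m := by simp at h ⊢; omega
        rw [pvRep1_cons₂, if_neg hde, pvCollapse_cons₂, pvCollapse_cons₂, ih (e :: u) d hlen]

theorem pvCollapse_rep1 (s : List Char) : pvCollapse (pvRep1 s) = pvCollapse s := by
  rcases s with _ | ⟨a, _ | ⟨b, t⟩⟩
  · rfl
  · rfl
  · by_cases hab : a = '_' ∧ b = '_'
    · obtain ⟨ha, hb⟩ := hab; subst ha; subst hb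
      rw [pvRep1_uu, pvCollapse_uu, pvAux t.length t '_' le_rfl]
    · rw [pvRep1_cons₂, if_neg hab, pvAux (b :: t).length (b :: t) a le_rfl]

theorem pvLoopA_eq_collapse (s : List Char) : pvLoopA s = pvCollapse s := by
  induction s using pvLoopA.induct with
  | case1 s h ih =>
    rw [pvLoopA, dif_pos h, ih, pvReplace_eq_rep1, pvCollapse_rep1]
  | case2 s h =>
    rw [pvLoopA, dif_neg h, pvNoDD s (by simpa using h)]

theorem pvGroups_ne_nil (u : List Char) : ∀ g ∈ pvGroups u, g ≠ [] := by
  induction u using pvGroups.induct with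
  | case1 => simp [pvGroups]
  | case2 c t h ih =>
    rw [pvGroups_cons, if_pos h]
    intro g hg
    simp only [List.mem_cons] at hg
    rcases hg with hg | hg
    · subst hg; simp
    · exact ih g hg
  | case3 c t h ih =>
    rw [pvGroups_cons, if_neg h]
    exact ih

theorem pvJ_nil_iff (u : List Char) : pvJ u = [] ↔ pvGroups u = [] := by
  constructor
  · intro h
    cases hg : pvGroups u with
    | nil => rfl
    | cons g gs =>
      exfalso
      have hne := pvGroups_ne_nil u g (by rw [hg]; simp)
      cases gs with
      | nil =>
        rw [pvJ, hg, PySem.Chars.join_singleton] at h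
        exact hne h
      | cons g2 gs' =>
        rw [pvJ, hg, PySem.Chars.join_cons_cons] at h
        simp at h
  · intro h; rw [pvJ, h, PySem.Chars.join_nil]

theorem pvJoin_cons_head (c : Char) (g : List Char) (gs : List (List Char)) :
    PySem.Chars.join ['_'] ((c :: g) :: gs) = c :: PySem.Chars.join ['_'] (g :: gs) := by
  cases gs with
  | nil => rw [PySem.Chars.join_singleton, PySem.Chars.join_singleton]
  | cons g2 gs' =>
    rw [PySem.Chars.join_cons_cons, PySem.Chars.join_cons_cons]
    simp

theorem pvJJ' : ∀ (t : List Char) (c : Char), PySem.Chars.isalnum c = true →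
    pvJ (c :: t) = c :: pvJ' t := by
  intro t
  induction t with
  | nil =>
    intro c hc
    rw [pvJ, pvGroups_cons, if_pos hc]
    simp only [List.takeWhile_nil, List.dropWhile_nil]
    rw [show pvGroups [] = [] from by rw [pvGroups], PySem.Chars.join_singleton]
    rfl
  | cons d u ih =>
    intro c hc
    by_cases hd : PySem.Chars.isalnum d
    · have h1 : pvGroups (c :: d :: u) =
          (c :: d :: u.takeWhile PySem.Chars.isalnum) :: pvGroups (u.dropWhile PySem.Chars.isalnum) := by
        rw [pvGroups_cons, if_pos hc, List.takeWhile_cons, List.dropWhile_cons]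
        simp [hd]
      have h2 : pvGroups (d :: u) =
          (d :: u.takeWhile PySem.Chars.isalnum) :: pvGroups (u.dropWhile PySem.Chars.isalnum) := by
        rw [pvGroups_cons, if_pos hd]
      rw [pvJ, h1, pvJoin_cons_head, ← h2, ← pvJ, ih d hd, pvJ'_cons, if_pos hd]
    · have hd' : PySem.Chars.isalnum d = false := by simpa using hd
      have h1 : pvGroups (c :: d :: u) = [c] :: pvGroups u := by
        rw [pvGroups_cons, if_pos hc, List.takeWhile_cons, List.dropWhile_cons]
        simp only [hd', Bool.false_eq_true, if_false]
        rw [pvGroups_cons, if_neg (by simp [hd'])]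
      rw [pvJ, h1, pvJ'_cons, if_neg (by simp [hd'])]
      by_cases hu : pvJ u = []
      · rw [if_pos hu, (pvJ_nil_iff u).mp hu, PySem.Chars.join_singleton]
      · rw [if_neg hu]
        cases hg : pvGroups u with
        | nil => exact absurd ((pvJ_nil_iff u).mpr hg) hu
        | cons g gs =>
          rw [PySem.Chars.join_cons_cons, pvJ, hg]
          rfl

theorem pvMain : ∀ (n : Nat) (cs : List Char), cs.length ≤ n →
    pvStripU (pvCollapse (cs.map pvSub)) = pvJ cs ∧
    pvRstrip (pvCollapse (cs.map pvSub)) = pvJ' cs := by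
  intro n
  induction n with
  | zero =>
    intro cs h
    have : cs = [] := by cases cs <;> simp_all
    subst this
    constructor <;> simp [pvStripU, pvRstrip, pvCollapse, pvJ, pvGroups,
      PySem.Chars.join_nil, pvJ']
  | succ m ih =>
    intro cs h
    rcases cs with _ | ⟨c, t⟩
    · constructor <;> simp [pvStripU, pvRstrip, pvCollapse, pvJ, pvGroups,
        PySem.Chars.join_nil, pvJ']
    · have hlen : t.length ≤ m := by simp at h; omega
      obtain ⟨ih1, ih2⟩ := ih t hlen
      by_cases ha : PySem.Chars.isalnum c
      · have hc' : c ≠ '_' := pvAlnum_ne c ha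
        have hmap : (c :: t).map pvSub = c :: t.map pvSub := by
          simp [pvSub, ha]
        constructor
        · rw [hmap, pvCollapse_cons_ne c _ hc', pvStripU_cons_ne c _ hc', ih2, pvJJ' t c ha]
        · rw [hmap, pvCollapse_cons_ne c _ hc', pvRstrip_cons_ne c _ hc', ih2,
              pvJ'_cons, if_pos ha]
      · have hmap : (c :: t).map pvSub = '_' :: t.map pvSub := by
          simp [pvSub, ha]
        constructor
        · rw [hmap, pvH1, ih1,
              show pvJ (c :: t) = pvJ t from by rw [pvJ, pvGroups_cons, if_neg ha, ← pvJ]]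
        · rw [hmap, pvH3, ih1, pvJ'_cons, if_neg ha]

def pvStep (acc : List (List Char) × List Char) (c : Char) : List (List Char) × List Char :=
  if PySem.Chars.isalnum c then (acc.1, acc.2 ++ [c])
  else if acc.2 = [] then acc else (acc.1 ++ [acc.2], [])

def pvG : List Char → List Char → List (List Char)
  | cur, [] => if cur = [] then [] else [cur]
  | cur, c :: t =>
    if PySem.Chars.isalnum c then pvG (cur ++ [c]) t
    else (if cur = [] then [] else [cur]) ++ pvG [] t

theorem pvBfold : ∀ (rest : List Char) (toks : List (List Char)) (cur : List Char),
    (if (rest.foldl pvStep (toks, cur)).2 = [] then (rest.foldl pvStep (toks, cur)).1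
     else (rest.foldl pvStep (toks, cur)).1 ++ [(rest.foldl pvStep (toks, cur)).2])
    = toks ++ pvG cur rest := by
  intro rest
  induction rest with
  | nil =>
    intro toks cur
    by_cases hc : cur = [] <;> simp [pvG, hc]
  | cons c t ih =>
    intro toks cur
    by_cases ha : PySem.Chars.isalnum c
    · simp only [List.foldl_cons, pvStep, if_pos ha, pvG]
      exact ih toks (cur ++ [c])
    · by_cases hc : cur = []
      · simp only [List.foldl_cons, pvStep, if_neg ha, if_pos hc, pvG]
        rw [ih toks cur]
        simp [hc]
      · simp only [List.foldl_cons, pvStep, if_neg ha, if_neg hc, pvG]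
        rw [ih (toks ++ [cur]) []]
        simp [hc]

theorem pvG_groups : ∀ (cs : List Char) (cur : List Char),
    pvG cur cs = if cur = [] then pvGroups cs
      else (cur ++ cs.takeWhile PySem.Chars.isalnum) :: pvGroups (cs.dropWhile PySem.Chars.isalnum) := by
  intro cs
  induction cs with
  | nil =>
    intro cur
    by_cases hc : cur = [] <;> simp [pvG, pvGroups, hc]
  | cons c t ih =>
    intro cur
    by_cases ha : PySem.Chars.isalnum c
    · simp only [pvG, if_pos ha]
      rw [ih (cur ++ [c]), if_neg (by simp)]
      simp only [List.takeWhile_cons, List.dropWhile_cons, ha, if_pos ha]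
      by_cases hc : cur = []
      · subst hc
        rw [if_pos rfl, pvGroups_cons, if_pos ha]
        simp
      · rw [if_neg hc]
        simp
    · have ha' : PySem.Chars.isalnum c = false := by simpa using ha
      simp only [pvG, ha', Bool.false_eq_true, if_false]
      rw [ih [], if_pos rfl]
      by_cases hc : cur = []
      · subst hc
        simp [pvGroups_cons, ha']
      · simp [hc, pvGroups_cons, ha', List.takeWhile_cons, List.dropWhile_cons]

-- ===== VERDICT (by name: the statement is the Claim_ definition above) =====
theorem sanitize_entity_name_spec : Claim_equal_sanitize_entity_name := by
  intro name _
  unfold Spec_sanitize_entity_name sanitize_entity_name sanitize_entity_name_alt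
  by_cases hn : name = ""
  · simp [hn]
  · rw [if_neg hn, if_neg hn]
    have hA : pvLoopA ((PySem.Chars.lower name.toList).map
        (fun c => if PySem.Chars.isalnum c then c else '_'))
        = pvCollapse ((PySem.Chars.lower name.toList).map pvSub) := by
      rw [pvLoopA_eq_collapse]; rfl
    simp only [hA, pvStrip_eq]
    obtain ⟨h1, _⟩ := pvMain (PySem.Chars.lower name.toList).length
      (PySem.Chars.lower name.toList) le_rfl
    rw [h1]
    have hB := pvBfold (PySem.Chars.lower name.toList) [] []
    rw [pvG_groups _ [], if_pos rfl] at hB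
    simp only [List.nil_append] at hB
    rw [show ((PySem.Chars.lower name.toList).foldl
        (fun (acc : List (List Char) × List Char) c =>
          if PySem.Chars.isalnum c then (acc.1, acc.2 ++ [c])
          else if acc.2 = [] then acc else (acc.1 ++ [acc.2], []))
        ([], [])) = (PySem.Chars.lower name.toList).foldl pvStep ([], []) from rfl]
    rw [hB, ← pvJ]
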